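-- pv_equiv track=rewrite | github.com/radityohanif/yolo-dataset-fusion | merge.py | get_class_images
-- ===== SOURCE A (Python) =====
-- from collections import defaultdict
--
-- def get_class_images(
--     images: list[dict], unified_map: dict[str, int]
-- ) -> dict[int, list[int]]:
--     """Map each class_id to list of image indices that contain that class."""
--     class_imgs: dict[int, list[int]] = defaultdict(list)
--     for idx, img in enumerate(images):
--         boxes = img.get("annotations", {}).get("boxes", [])
--         classes_in_img = set()
--         for box in boxes:
--             classes_in_img.add(int(box[0]))
--         for cid in classes_in_img:
--             class_imgs[cid].append(idx)
--     return dict(class_imgs)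
-- ===== SOURCE B (Python) =====
-- def get_class_images(
--     images: list[dict], unified_map: dict[str, int]
-- ) -> dict[int, list[int]]:
--     """Map each class_id to list of image indices that contain that class."""
--     cid_sets = [{int(box[0]) for box in img.get("annotations", {}).get("boxes", [])}
--                 for img in images]
--     all_cids = dict.fromkeys(cid for s in cid_sets for cid in s)
--     return {cid: [idx for idx, s in enumerate(cid_sets) if cid in s]
--             for cid in all_cids}
-- ===== Notes on version B (the rewrite author's own statement) =====
-- stated objective: alternative
-- what changed: Replaces A's single pass that accumulates image indices into a defaultdict with a staged pipeline: precompute each image's class-id set, take the ordered distinct class ids via dict.fromkeys, then build each class's index list by a dedicated scan over the enumerated per-image sets.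
import Mathlib
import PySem

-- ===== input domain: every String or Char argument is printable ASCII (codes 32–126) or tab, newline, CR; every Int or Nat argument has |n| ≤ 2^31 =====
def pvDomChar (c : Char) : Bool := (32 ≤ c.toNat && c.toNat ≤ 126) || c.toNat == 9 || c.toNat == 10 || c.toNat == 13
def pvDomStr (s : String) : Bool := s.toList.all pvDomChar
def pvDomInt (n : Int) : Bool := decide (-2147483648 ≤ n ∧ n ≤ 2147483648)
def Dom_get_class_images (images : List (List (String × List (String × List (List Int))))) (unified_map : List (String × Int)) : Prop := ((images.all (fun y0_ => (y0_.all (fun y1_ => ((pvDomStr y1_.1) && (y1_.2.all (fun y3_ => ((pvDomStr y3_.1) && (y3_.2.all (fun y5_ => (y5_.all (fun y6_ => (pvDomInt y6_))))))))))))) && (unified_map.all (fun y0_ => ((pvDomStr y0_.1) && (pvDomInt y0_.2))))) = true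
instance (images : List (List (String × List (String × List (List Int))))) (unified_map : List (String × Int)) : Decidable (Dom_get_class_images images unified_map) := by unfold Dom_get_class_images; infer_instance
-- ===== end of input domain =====

-- B replaces A's single accumulate-into-a-dict pass by two staged passes: first the per-image
-- class sets and the ordered list of distinct class ids, then one scan over the enumerated
-- sets per class id collecting the image indices (alternative decomposition, same results).

-- shared helper for the source line  img.get("annotations", {}).get("boxes", [])
def pvBoxes (img : List (String × List (String × List (List Int)))) : List (List Int) :=
  (PySem.Dict.mk ((PySem.Dict.mk img).getD "annotations" [])).getD "boxes" []

-- int(box[0]): box[0] is pyGet?; the `.getD 0` arm is dead under Pre_ (empty boxes, where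
-- Python raises IndexError, are excluded by Pre_get_class_images)
def pvCid (box : List Int) : Int :=
  (PySem.List.pyGet? box 0).getD 0

-- ===== PORT A =====
-- (the dict built by iterating the per-image set: only KEY insertion order can depend on the
-- set's iteration order; dict outputs are compared ignoring order)
def get_class_images (images : List (List (String × List (String × List (List Int))))) (unified_map : List (String × Int)) : List (Int × List Int) :=
  ((PySem.List.enumerate images 0).foldl
    (fun (class_imgs : PySem.Dict Int (List Int)) p =>
      let boxes := pvBoxes p.2
      let classes_in_img : PySem.Set Int :=
        boxes.foldl (fun s box => PySem.Set.add s (pvCid box)) PySem.Set.empty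
      classes_in_img.foldl
        (fun d cid => PySem.Dict.insert d cid (PySem.Dict.getD d cid [] ++ [p.1])) class_imgs)
    (PySem.Dict.mk [])).items

-- ===== PORT B =====
-- pass 1: the set of class ids of each image; pass 2: dict.fromkeys over the flattened sets
-- (ordered dedup = PySem.List.dedup); pass 3: for each class id, scan the enumerated sets
def get_class_images_alt (images : List (List (String × List (String × List (List Int))))) (unified_map : List (String × Int)) : List (Int × List Int) :=
  let cid_sets : List (PySem.Set Int) :=
    images.map (fun img => PySem.Set.ofList ((pvBoxes img).map pvCid))
  let all_cids : List Int := PySem.List.dedup cid_sets.flatten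
  all_cids.map (fun cid =>
    (cid, ((PySem.List.enumerate cid_sets 0).filter (fun p => decide (cid ∈ p.2))).map (fun p => p.1)))

-- ===== PRECONDITION & SPEC =====
-- Pre_ excludes inputs containing an empty box, on which Python A (and Python B) raise
-- IndexError at box[0].
def Pre_get_class_images (images : List (List (String × List (String × List (List Int))))) (unified_map : List (String × Int)) : Prop :=
  ∀ img ∈ images, ∀ box ∈ pvBoxes img, box ≠ []
instance (images : List (List (String × List (String × List (List Int))))) (unified_map : List (String × Int)) : Decidable (Pre_get_class_images images unified_map) := by unfold Pre_get_class_images; infer_instance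

def pvWitness_get_class_images : (List (List (String × List (String × List (List Int))))) × (List (String × Int)) :=
  ([[("annotations", [("boxes", [[1], [2], [1]])])], []], [("cat", 1)])

def Spec_get_class_images (images : List (List (String × List (String × List (List Int))))) (unified_map : List (String × Int)) (out : List (Int × List Int)) : Prop := out = get_class_images_alt images unified_map
instance (images : List (List (String × List (String × List (List Int))))) (unified_map : List (String × Int)) (out : List (Int × List Int)) : Decidable (Spec_get_class_images images unified_map out) := by unfold Spec_get_class_images; infer_instance

-- ===== CLAIM (what is proved, stated in full; the proofs are below) =====
def Claim_equal_get_class_images : Prop := ∀ (images : List (List (String × List (String × List (List Int))))) (unified_map : List (String × Int)), Dom_get_class_images images unified_map → Pre_get_class_images images unified_map → Spec_get_class_images images unified_map (get_class_images images unified_map)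

-- ===== LEMMAS AND PROOFS =====

-- the set of class ids of one image, and A's per-image dict step, named for the proofs
def pvCset (img : List (String × List (String × List (List Int)))) : PySem.Set Int :=
  PySem.Set.ofList ((pvBoxes img).map pvCid)

def pvAstep (d : PySem.Dict Int (List Int)) (p : Int × List (String × List (String × List (List Int)))) : PySem.Dict Int (List Int) :=
  (pvCset p.2).foldl (fun d cid => PySem.Dict.insert d cid (PySem.Dict.getD d cid [] ++ [p.1])) d

lemma pv_cset_eq (img : List (String × List (String × List (List Int)))) :
    (pvBoxes img).foldl (fun s box => PySem.Set.add s (pvCid box)) PySem.Set.empty = pvCset img := by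
  rw [pvCset, PySem.Set.ofList_eq_foldl, List.foldl_map]
  rfl

-- effect of A's inner loop (over a duplicate-free list of cids) on one lookup
lemma pv_inner_getD (cs : List Int) (hn : cs.Nodup) (i c : Int) :
    ∀ d : PySem.Dict Int (List Int),
      (cs.foldl (fun d cid => PySem.Dict.insert d cid (PySem.Dict.getD d cid [] ++ [i])) d).getD c []
        = if c ∈ cs then PySem.Dict.getD d c [] ++ [i] else PySem.Dict.getD d c [] := by
  induction cs with
  | nil => intro d; simp
  | cons c' cs ih =>
    intro d
    rw [List.foldl_cons, ih (List.nodup_cons.mp hn).2]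
    by_cases hc : c ∈ cs
    · have hne : c ≠ c' := fun h => (List.nodup_cons.mp hn).1 (h ▸ hc)
      simp [hc, hne, PySem.Dict.getD_insert]
    · by_cases he : c = c'
      · subst he; simp [hc]
      · simp [hc, he, PySem.Dict.getD_insert]

-- effect of A's outer loop on one lookup: the indices of the images containing c get appended
lemma pv_outer_getD (L : List (Int × List (String × List (String × List (List Int))))) (c : Int) :
    ∀ d : PySem.Dict Int (List Int),
      (L.foldl pvAstep d).getD c []
        = PySem.Dict.getD d c [] ++ (L.filter (fun p => decide (c ∈ pvCset p.2))).map (fun p => p.1) := by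
  induction L with
  | nil => intro d; simp
  | cons p L ih =>
    intro d
    rw [List.foldl_cons, ih, pvAstep, pv_inner_getD (pvCset p.2) (by rw [pvCset]; exact PySem.Set.nodup_ofList _) p.1 c d]
    by_cases hc : c ∈ pvCset p.2 <;> simp [hc]

-- A's dict keys: all class ids in first-insertion order
lemma pv_keys (L : List (Int × List (String × List (String × List (List Int))))) :
    ∀ d : PySem.Dict Int (List Int),
      (L.foldl pvAstep d).keys = PySem.Set.update d.keys (L.flatMap (fun p => pvCset p.2)) := by
  induction L with
  | nil => intro d; simp [PySem.Set.update]
  | cons p L ih =>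
    intro d
    rw [List.foldl_cons, ih, pvAstep, PySem.Dict.keys_foldl_insert]
    simp [PySem.Set.update, List.foldl_append]

lemma pv_nodup_keys (L : List (Int × List (String × List (String × List (List Int))))) :
    ∀ d : PySem.Dict Int (List Int), d.keys.Nodup → (L.foldl pvAstep d).keys.Nodup := by
  induction L with
  | nil => intro d h; simpa
  | cons p L ih =>
    intro d h
    rw [List.foldl_cons]
    exact ih _ (PySem.Dict.nodup_keys_foldl_insert _ _ _ h)

-- enumerate commutes with map / forgets its indices under flatMap
lemma pv_enum_map {α β : Type} (f : α → β) (xs : List α) (n : Int) :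
    PySem.List.enumerate (xs.map f) n = (PySem.List.enumerate xs n).map (fun p => (p.1, f p.2)) := by
  induction xs generalizing n with
  | nil => simp
  | cons x xs ih => simp [PySem.List.enumerate_cons, ih]

lemma pv_enum_flatMap {α β : Type} (f : α → List β) (xs : List α) (n : Int) :
    (PySem.List.enumerate xs n).flatMap (fun p => f p.2) = xs.flatMap f := by
  induction xs generalizing n with
  | nil => simp
  | cons x xs ih => simp [PySem.List.enumerate_cons, ih]

-- ===== VERDICT (by name: the statement is the Claim_ definition above) =====
theorem get_class_images_spec : Claim_equal_get_class_images := by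
  unfold Claim_equal_get_class_images
  intro images unified_map _ _
  unfold Spec_get_class_images get_class_images get_class_images_alt
  have hfun : (PySem.List.enumerate images 0).foldl
      (fun (class_imgs : PySem.Dict Int (List Int)) p =>
        let boxes := pvBoxes p.2
        let classes_in_img : PySem.Set Int :=
          boxes.foldl (fun s box => PySem.Set.add s (pvCid box)) PySem.Set.empty
        classes_in_img.foldl
          (fun d cid => PySem.Dict.insert d cid (PySem.Dict.getD d cid [] ++ [p.1])) class_imgs)
      (PySem.Dict.mk [])
      = (PySem.List.enumerate images 0).foldl pvAstep (PySem.Dict.mk []) := by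
    apply PySem.List.foldl_congr_mem
    intro d p _
    simp only [pv_cset_eq, pvAstep]
  rw [hfun]
  have hnd : ((PySem.List.enumerate images 0).foldl pvAstep (PySem.Dict.mk [])).keys.Nodup := by
    apply pv_nodup_keys
    simp [PySem.Dict.keys_mk]
  rw [PySem.Dict.items_eq_map_keys _ hnd []]
  rw [pv_keys]
  have hkeys : PySem.Set.update (PySem.Dict.mk ([] : List (Int × List Int))).keys
      ((PySem.List.enumerate images 0).flatMap (fun p => pvCset p.2))
      = PySem.List.dedup ((images.map (fun img => PySem.Set.ofList ((pvBoxes img).map pvCid))).flatten) := by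
    rw [List.flatten_eq_flatMap, List.flatMap_map, pv_enum_flatMap (fun img => pvCset img) images 0]
    simp [PySem.Set.update, PySem.List.dedup, PySem.Set.ofList_eq_foldl, PySem.Dict.keys_mk, pvCset]
  rw [hkeys]
  apply List.map_congr_left
  intro c _
  rw [pv_outer_getD]
  rw [pv_enum_map (fun img => PySem.Set.ofList ((pvBoxes img).map pvCid)) images 0]
  rw [List.filter_map, List.map_map]
  simp [PySem.Dict.getD, PySem.Dict.get?, pvCset, Function.comp_def]
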